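-- pv_equiv track=rewrite | github.com/VanLance/wbs | feedTheKids.py | feedTheKids
-- ===== SOURCE A (Python) =====
-- def feedTheKids(students,sammys):
--     sammy,studentDict=sammys[::-1],{}
--     for kid in students:
--         studentDict[kid]=studentDict.get(kid,0)+1
--     while sammy:
--         if studentDict[sammy[-1]]==0:
--                 break
--         current=students.pop(0)
--         if current == sammy[-1]:
--             sammy.pop()
--             studentDict[current]-=1
--         else:
--             students.append(current)
--     return len(students)
-- ===== SOURCE B (Python) =====
-- # One-pass counter scan: count students per sandwich type once, then walk the
-- # sandwich list in order, serving while someone still wants the current type.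
-- # (A also empties/rotates the `students` list in place; B does not mutate it —
-- # the equivalence claimed is about the return value.)
-- def feedTheKids(students, sammys):
--     cnt = {}
--     for kid in students:
--         cnt[kid] = cnt.get(kid, 0) + 1
--     served = 0
--     for s in sammys:
--         if cnt[s] == 0:
--             break
--         cnt[s] -= 1
--         served += 1
--     return len(students) - served
-- ===== Notes on version B (the rewrite author's own statement) =====
-- stated objective: faster
-- what changed: Instead of simulating the queue (repeatedly popping the front student and re-appending non-matching ones, an O(n*m) rotation process), B counts students per sandwich type once and makes a single pass over the sandwiches, decrementing the count and stopping at the first sandwich type with no remaining demand.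
import Mathlib
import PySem

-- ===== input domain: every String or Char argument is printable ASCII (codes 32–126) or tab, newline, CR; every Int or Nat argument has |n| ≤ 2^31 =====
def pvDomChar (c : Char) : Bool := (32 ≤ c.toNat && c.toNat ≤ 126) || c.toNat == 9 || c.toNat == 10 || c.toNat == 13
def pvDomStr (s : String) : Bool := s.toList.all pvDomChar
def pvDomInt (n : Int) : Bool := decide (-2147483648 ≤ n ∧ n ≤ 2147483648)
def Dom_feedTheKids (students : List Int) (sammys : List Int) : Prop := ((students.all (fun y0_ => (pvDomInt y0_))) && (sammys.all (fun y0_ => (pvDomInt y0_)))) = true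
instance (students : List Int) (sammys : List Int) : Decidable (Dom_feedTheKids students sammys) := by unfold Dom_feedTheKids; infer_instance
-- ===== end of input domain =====

-- B replaces A's O(n*m) queue-rotation simulation by a counter built once plus a single
-- pass over the sandwiches (objective: faster). A empties/rotates `students` in place;
-- B does not mutate it — the equivalence proved is about the return value only.

-- ===== PORT A =====
-- The while loop, with fuel (the loop rotates the queue; on Pre_ inputs the supplied fuel
-- is proved sufficient below).  `none` = a Python exception: KeyError from
-- `studentDict[sammy[-1]]` (Dict.get? misses), IndexError from `students.pop(0)` on an
-- empty list, or fuel exhaustion (never reached on Pre_ inputs).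
def feedTheKidsLoop (fuel : Nat) (students : List Int) (sammy : List Int)
    (d : PySem.Dict Int Int) : Option Int :=
  match fuel with
  | 0 => none
  | fuel + 1 =>
    match sammy with
    | [] => some (students.length : Int)                     -- while sammy: … falls through
    | _ :: _ =>
      match PySem.List.pyGet? sammy (-1) with                -- sammy[-1]
      | none => none
      | some top =>
        match PySem.Dict.get? d top with                     -- studentDict[sammy[-1]] (KeyError = none)
        | none => none
        | some c =>
          if c = 0 then some (students.length : Int)         -- break
          else
            match PySem.List.pop? students 0 with            -- current = students.pop(0)
            | none => none
            | some (current, students') =>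
              if current = top then
                match PySem.List.pop? sammy (-1) with        -- sammy.pop()
                | none => none
                | some (_, sammy') =>
                  feedTheKidsLoop fuel students' sammy'
                    (PySem.Dict.modify d current 0 (· - 1))  -- studentDict[current] -= 1 (key present here)
              else
                feedTheKidsLoop fuel (students' ++ [current]) sammy d  -- students.append(current)

def feedTheKids (students : List Int) (sammys : List Int) : Int :=
  let sammy := (PySem.List.slice? sammys none none (-1)).getD []   -- sammys[::-1] (step ≠ 0: never raises)
  let d := students.foldl (fun d kid => d.insert kid (d.getD kid 0 + 1)) PySem.Dict.empty
  (feedTheKidsLoop ((sammys.length + 1) * (students.length + 1)) students sammy d).getD 0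
  -- `.getD 0` only unwraps: on Pre_ inputs the loop is proved to return `some _`

-- ===== PORT B =====
def feedTheKidsAltLoop (cnt : PySem.Dict Int Int) (l : List Int) (served : Int) : Int :=
  match l with
  | [] => served
  | s :: rest =>
    if cnt.getD s 0 = 0 then served                          -- break (cnt[s]: key present on Pre_ inputs, where getD is exact)
    else feedTheKidsAltLoop (cnt.modify s 0 (· - 1)) rest (served + 1)  -- cnt[s] -= 1

def feedTheKids_alt (students : List Int) (sammys : List Int) : Int :=
  let cnt := students.foldl (fun d kid => d.insert kid (d.getD kid 0 + 1)) PySem.Dict.empty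
  (students.length : Int) - feedTheKidsAltLoop cnt sammys 0

-- ===== PRECONDITION & SPEC =====
-- Closed-form: every sandwich type absent from `students` must be preceded (in sammys)
-- by a sandwich whose type IS a student type but whose demand is already exhausted by the
-- earlier sandwiches — i.e. the serving loop breaks before it ever looks that type up.
def GoodSuffix (K : List Int) (f : Int → Nat) (sl : List Int) : Prop :=
  ∀ j, (hj : j < sl.length) → sl[j] ∈ K ∨
    ∃ i, ∃ (hi : i < j), sl[i]'(hi.trans hj) ∈ K ∧
      f (sl[i]'(hi.trans hj)) ≤ (sl.take i).count (sl[i]'(hi.trans hj))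

-- Pre_ excludes exactly the inputs on which A raises KeyError (the loop reaches a sandwich
-- type that no student ever had, so `studentDict[sammy[-1]]` misses).
def Pre_feedTheKids (students : List Int) (sammys : List Int) : Prop :=
  GoodSuffix students (fun v => students.count v) sammys

instance (students : List Int) (sammys : List Int) : Decidable (Pre_feedTheKids students sammys) := by
  unfold Pre_feedTheKids GoodSuffix; infer_instance

def pvWitness_feedTheKids : List Int × List Int := ([1, 2, 1], [1, 2, 2])

def Spec_feedTheKids (students : List Int) (sammys : List Int) (out : Int) : Prop := out = feedTheKids_alt students sammys
instance (students : List Int) (sammys : List Int) (out : Int) : Decidable (Spec_feedTheKids students sammys out) := by unfold Spec_feedTheKids; infer_instance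

-- ===== CLAIM (what is proved, stated in full; the proofs are below) =====
def Claim_equal_feedTheKids : Prop := ∀ (students : List Int) (sammys : List Int), Dom_feedTheKids students sammys → Pre_feedTheKids students sammys → Spec_feedTheKids students sammys (feedTheKids students sammys)

-- ===== LEMMAS AND PROOFS =====

-- Abstract count of sandwiches the greedy pass serves, over a pure count function.
def pureServe (f : Int → Nat) (sl : List Int) : Int :=
  match sl with
  | [] => 0
  | t :: rest => if f t = 0 then 0 else 1 + pureServe (fun v => if v = t then f v - 1 else f v) rest

lemma get?_counter_eq (students : List Int) (v : Int) :
    PySem.Dict.get? (students.foldl (fun d kid => d.insert kid (d.getD kid 0 + 1)) PySem.Dict.empty) v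
      = if v ∈ students then some ((students.count v : Nat) : Int) else none := by
  rw [PySem.Dict.foldl_insert_getD_add_one_eq_counter]
  by_cases h : v ∈ students
  · simp only [h, if_pos]
    have hc : (PySem.Dict.counter students).contains v = true := by
      rw [PySem.Dict.contains_counter]; simpa using h
    have hs : ((PySem.Dict.counter students).get? v).isSome = true := by
      rw [← PySem.Dict.contains_eq_isSome_get?]; exact hc
    rcases Option.isSome_iff_exists.mp hs with ⟨w, hw⟩
    have := PySem.Dict.getD_counter (xs := students) (v := v)
    rw [PySem.Dict.getD_eq_get?_getD, hw] at this
    simp at this; rw [hw, this]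
  · simp only [h, if_false]
    rw [(PySem.Dict.get?_eq_none_iff_contains _ _).2]
    rw [PySem.Dict.contains_counter]
    simpa using h

lemma get?_modify_dec (d : PySem.Dict Int Int) (t v c : Int) (h : PySem.Dict.get? d t = some c) :
    PySem.Dict.get? (PySem.Dict.modify d t 0 (· - 1)) v
      = if v = t then some (c - 1) else PySem.Dict.get? d v := by
  unfold PySem.Dict.modify
  rw [PySem.Dict.get?_insert]
  simp [PySem.Dict.getD_eq_get?_getD, h]

-- One full rotation: the first matching student is at position xs.length.
lemma loop_rot (xs : List Int) (t : Int) (ys sammy : List Int) (d : PySem.Dict Int Int)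
    (fuel : Nat) (hx : t ∉ xs) (hs : PySem.List.pyGet? sammy (-1) = some t)
    (c : Int) (hd : PySem.Dict.get? d t = some c) (hc : c ≠ 0) :
    feedTheKidsLoop (fuel + xs.length) (xs ++ t :: ys) sammy d
      = feedTheKidsLoop fuel (t :: (ys ++ xs)) sammy d := by
  induction xs generalizing ys with
  | nil => simp
  | cons a xs' ih =>
    have hat : ¬ (a = t) := fun h => hx (by simp [h])
    have hx' : t ∉ xs' := fun h => hx (by simp [h])
    cases sammy with
    | nil => simp [PySem.List.pyGet?] at hs
    | cons s0 srest =>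
      have hstep : fuel + (a :: xs').length = (fuel + xs'.length) + 1 := by simp; omega
      rw [hstep]
      simp only [List.cons_append]
      rw [show feedTheKidsLoop ((fuel + xs'.length) + 1) (a :: (xs' ++ t :: ys)) (s0 :: srest) d
            = feedTheKidsLoop (fuel + xs'.length) ((xs' ++ t :: ys) ++ [a]) (s0 :: srest) d by
        simp [feedTheKidsLoop, hs, hd, hc, PySem.List.pop?_zero_cons, hat]]
      rw [show (xs' ++ t :: ys) ++ [a] = xs' ++ t :: (ys ++ [a]) by simp]
      rw [ih (ys ++ [a]) hx']
      simp

lemma goodSuffix_tail (K : List Int) (f : Int → Nat) (t : Int) (rest : List Int)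
    (h : GoodSuffix K f (t :: rest)) (hft : f t ≠ 0) :
    GoodSuffix K (fun v => if v = t then f v - 1 else f v) rest := by
  intro j hj
  have hj' : j + 1 < (t :: rest).length := by simp; omega
  rcases h (j + 1) hj' with hl | ⟨i, hi, hmem, hcnt⟩
  · left; simpa using hl
  · right
    match i, hi with
    | 0, _ =>
      simp at hcnt
      omega
    | i' + 1, hi =>
      refine ⟨i', by omega, ?_, ?_⟩
      · simpa using hmem
      · simp only [List.getElem_cons_succ] at hmem hcnt ⊢
        rw [List.take_succ_cons, List.count_cons] at hcnt
        by_cases he : rest[i']'(by omega) = t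
        · simp only [he, if_pos]
          rw [he] at hcnt
          simp at hcnt
          omega
        · simp only [he, if_false]
          rw [show ((t : Int) == rest[i']'(by omega)) = false by simp; omega] at hcnt
          simpa using hcnt

lemma loop_eq (sl : List Int) : ∀ (Q : List Int) (d : PySem.Dict Int Int) (K : List Int) (fuel : Nat),
    (∀ v : Int, PySem.Dict.get? d v = if v ∈ K then some ((Q.count v : Nat) : Int) else none) →
    GoodSuffix K (fun v => Q.count v) sl →
    sl.length * Q.length + 1 ≤ fuel →
    feedTheKidsLoop fuel Q sl.reverse d = some ((Q.length : Int) - pureServe (fun v => Q.count v) sl) := by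
  induction sl with
  | nil =>
    intro Q d K fuel hinv hgood hfuel
    obtain ⟨m, rfl⟩ : ∃ m, fuel = m + 1 := ⟨fuel - 1, by omega⟩
    simp [feedTheKidsLoop, pureServe]
  | cons t rest ih =>
    intro Q d K fuel hinv hgood hfuel
    have hmemt : t ∈ K := by
      rcases hgood 0 (by simp) with h | ⟨i, hi, _⟩
      · simpa using h
      · omega
    have htop : PySem.List.pyGet? (rest.reverse ++ [t]) (-1) = some t :=
      PySem.List.pyGet?_neg_one_append_singleton _ _
    obtain ⟨s0, sr, hsam⟩ : ∃ s0 sr, rest.reverse ++ [t] = s0 :: sr := by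
      cases h : rest.reverse ++ [t] with
      | nil => simp at h
      | cons a b => exact ⟨a, b, rfl⟩
    have hrev : (t :: rest).reverse = rest.reverse ++ [t] := by simp
    have hdt : PySem.Dict.get? d t = some ((Q.count t : Nat) : Int) := by
      rw [hinv t]; simp [hmemt]
    by_cases hct : Q.count t = 0
    · -- the break: demand for t is exhausted
      obtain ⟨m, rfl⟩ : ∃ m, fuel = m + 1 := ⟨fuel - 1, by omega⟩
      rw [hrev, hsam]
      rw [hsam] at htop
      simp [feedTheKidsLoop, htop, hdt, hct, pureServe]
    · -- serve one sandwich of type t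
      have htQ : t ∈ Q := by
        by_contra hn
        exact hct (List.count_eq_zero.mpr hn)
      obtain ⟨k, hk⟩ := Option.isSome_iff_exists.mp ((PySem.List.index?_isSome_iff Q t).mpr htQ)
      obtain ⟨xs, ys, hQ, hlen, hnx⟩ := (PySem.List.index?_eq_some_iff Q t k).mp hk
      have hcast : ((Q.count t : Nat) : Int) ≠ 0 := by exact_mod_cast hct
      have hQlen : Q.length = xs.length + ys.length + 1 := by rw [hQ]; simp; omega
      have h1 : Q.length ≤ (rest.length + 1) * Q.length := Nat.le_mul_of_pos_left _ (by omega)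
      have hfx : xs.length + 2 ≤ fuel := by
        simp only [List.length_cons] at hfuel
        linarith
      obtain ⟨m, hm⟩ : ∃ m, fuel = (m + 1) + xs.length := ⟨fuel - xs.length - 1, by omega⟩
      rw [hrev, hQ, hm, loop_rot xs t ys _ d (m + 1) hnx htop _ hdt hcast]
      rw [hsam] at htop
      rw [hsam]
      rw [show feedTheKidsLoop (m + 1) (t :: (ys ++ xs)) (s0 :: sr) d
            = feedTheKidsLoop m (ys ++ xs) rest.reverse (PySem.Dict.modify d t 0 (· - 1)) by
        simp [feedTheKidsLoop, hdt, hct, PySem.List.pop?_zero_cons, ← hsam,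
          PySem.List.pop?_last]]
      have hcxs : xs.count t = 0 := List.count_eq_zero.mpr hnx
      have hcnt' : (fun v : Int => ((ys ++ xs).count v)) 
          = (fun v => if v = t then Q.count v - 1 else Q.count v) := by
        funext v
        by_cases hv : v = t
        · subst hv
          rw [hQ]
          simp [List.count_append, hcxs]
        · rw [hQ]
          simp only [hv, if_false]
          simp [List.count_append, show ¬ t = v from fun h => hv h.symm]
          omega
      rw [ih (ys ++ xs) _ K m ?_ ?_ ?_]
      · rw [← hQ]
        rw [show pureServe (fun v => Q.count v) (t :: rest)
              = 1 + pureServe (fun v => if v = t then Q.count v - 1 else Q.count v) rest by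
            simp [pureServe, hct]]
        rw [← hcnt']
        have hlen' : (((ys ++ xs).length : Nat) : Int) = (Q.length : Int) - 1 := by
          rw [hQlen]; push_cast [List.length_append]; ring
        rw [hlen']
        ring_nf
      · -- invariant for the decremented dict
        intro v
        rw [get?_modify_dec d t v _ hdt]
        by_cases hv : v = t
        · rw [hv]
          simp only [hmemt, if_pos]
          have hys : ((ys ++ xs).count t : Nat) = Q.count t - 1 := by
            rw [congrFun hcnt' t]; simp
          rw [hys]
          have hpos : 1 ≤ Q.count t := by omega
          push_cast [Nat.cast_sub hpos]
          ring_nf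
        · rw [if_neg hv, hinv v]
          by_cases hvK : v ∈ K
          · simp only [hvK, if_true]
            rw [congrFun hcnt' v, if_neg hv]
          · simp [hvK]
      · -- GoodSuffix for the rest
        rw [hcnt']
        exact goodSuffix_tail K (fun v => Q.count v) t rest hgood hct
      · -- enough fuel remains
        simp only [List.length_cons] at hfuel
        have e1 : (rest.length + 1) * Q.length = rest.length * xs.length + rest.length * ys.length
            + rest.length + xs.length + ys.length + 1 := by rw [hQlen]; ring
        have e2 : rest.length * (ys ++ xs).length = rest.length * ys.length + rest.length * xs.length := by
          simp [List.length_append]; ring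
        rw [e2]
        rw [e1, hm] at hfuel
        omega

lemma altLoop_eq (l : List Int) : ∀ (cnt : PySem.Dict Int Int) (served : Int) (f : Int → Nat),
    (∀ v, cnt.getD v 0 = ((f v : Nat) : Int)) →
    feedTheKidsAltLoop cnt l served = served + pureServe f l := by
  induction l with
  | nil => intro cnt served f _; simp [feedTheKidsAltLoop, pureServe]
  | cons s rest ih =>
    intro cnt served f hinv
    by_cases hf : f s = 0
    · rw [show feedTheKidsAltLoop cnt (s :: rest) served = served by
        simp [feedTheKidsAltLoop, hinv s, hf]]
      simp [pureServe, hf]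
    · rw [show feedTheKidsAltLoop cnt (s :: rest) served
          = feedTheKidsAltLoop (cnt.modify s 0 (· - 1)) rest (served + 1) by
        simp only [feedTheKidsAltLoop, hinv s]
        rw [if_neg (by exact_mod_cast hf)]]
      rw [ih _ _ (fun v => if v = s then f v - 1 else f v) (by
        intro v
        rw [PySem.Dict.getD_modify]
        by_cases hv : v = s
        · simp only [hv, if_pos, hinv s]
          push_cast [Nat.cast_sub (by omega : 1 ≤ f s)]
          ring
        · simp [hv, hinv v])]
      simp only [pureServe, hf, if_false]
      ring

lemma alt_closed (students sammys : List Int) :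
    feedTheKids_alt students sammys
      = (students.length : Int) - pureServe (fun v => students.count v) sammys := by
  show (students.length : Int)
      - feedTheKidsAltLoop (students.foldl (fun d kid => d.insert kid (d.getD kid 0 + 1)) PySem.Dict.empty) sammys 0
      = _
  rw [altLoop_eq sammys _ 0 (fun v => students.count v) (by
    intro v
    rw [PySem.Dict.getD_foldl_insert_add_one]
    simp [PySem.Dict.getD_empty])]
  ring

-- ===== VERDICT (by name: the statement is the Claim_ definition above) =====
theorem feedTheKids_spec : Claim_equal_feedTheKids := by
  intro students sammys _ hpre
  unfold Spec_feedTheKids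
  unfold feedTheKids
  simp only [PySem.List.slice?_none_none_neg_one, Option.getD_some]
  rw [loop_eq sammys students _ students _ (get?_counter_eq students) hpre (by nlinarith)]
  rw [alt_closed]
  rfl
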